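-- pv_equiv track=rewrite | github.com/GregoryKogan/hexqr | Modules/scaner.py | position_by_index
-- ===== SOURCE A (Python) =====
-- def position_by_index(index, n):
--     cells_at_current_row = n * 2 + 1
--     current_pos = 1
--     current_row = 1
--     current_index = 1
--     while current_index < index:
--         current_index += 1
--         current_pos += 1
--         if current_pos > cells_at_current_row:
--             current_pos = 1
--             current_row += 1
--             if current_row <= n:
--                 cells_at_current_row += 2
--             elif current_row != n + 1:
--                 cells_at_current_row -= 2
--
--     return current_row, current_pos
-- ===== SOURCE B (Python) =====
-- def _least(lo, hi, pred):
--     # smallest x in [lo, hi] with pred(x); caller guarantees pred(hi)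
--     while lo < hi:
--         mid = (lo + hi) // 2
--         if pred(mid):
--             hi = mid
--         else:
--             lo = mid + 1
--     return lo
--
--
-- def position_by_index(index, n):
--     if index <= 1:
--         return 1, 1
--     if n <= 0:
--         return index, 1
--     if index <= 3 * n * n:
--         r = _least(1, n, lambda x: index <= x * (2 * n + x))
--         return r, index - (r - 1) * (2 * n + r - 1)
--     if index <= 7 * n * n:
--         c = index - 3 * n * n
--         k = _least(1, 2 * n, lambda x: c <= x * (4 * n - x))
--         return n + k, c - (k - 1) * (4 * n - k + 1)
--     return 3 * n + index - 7 * n * n, 1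
-- ===== Notes on version B (the rewrite author's own statement) =====
-- stated objective: faster
-- what changed: Replaces the cell-by-cell O(index) simulation of the hex grid walk with closed-form per-row cumulative cell counts (quadratic formulas for the growing and shrinking halves) plus a binary search for the row, O(log n).
import Mathlib
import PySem

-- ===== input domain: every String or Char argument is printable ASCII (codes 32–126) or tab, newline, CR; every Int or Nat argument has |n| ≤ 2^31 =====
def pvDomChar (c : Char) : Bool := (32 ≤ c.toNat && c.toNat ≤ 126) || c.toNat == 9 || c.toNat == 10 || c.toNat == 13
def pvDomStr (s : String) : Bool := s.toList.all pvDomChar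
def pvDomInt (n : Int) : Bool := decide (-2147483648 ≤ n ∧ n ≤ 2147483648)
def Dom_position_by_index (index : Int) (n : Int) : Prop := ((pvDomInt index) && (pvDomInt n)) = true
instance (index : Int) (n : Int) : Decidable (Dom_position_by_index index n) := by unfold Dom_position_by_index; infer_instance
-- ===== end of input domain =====

-- B replaces A's cell-by-cell O(index) walk by closed-form per-row cumulative counts
-- plus a binary search for the row (objective: faster, asymptotically).

-- ===== PORT A =====
-- literal port of A's while loop; fuel = number of iterations = max(index - 1, 0)
def posLoop (n : Int) : Nat → Int → Int → Int → Int × Int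
  | 0, row, pos, _ => (row, pos)
  | m + 1, row, pos, w =>
      let pos' := pos + 1
      if pos' > w then
        let row' := row + 1
        let w' := if row' ≤ n then w + 2 else if row' ≠ n + 1 then w - 2 else w
        posLoop n m row' 1 w'
      else
        posLoop n m row pos' w

def position_by_index (index : Int) (n : Int) : Int × Int :=
  posLoop n (index - 1).toNat 1 1 (n * 2 + 1)

-- ===== PORT B =====
-- port of Source B's _least: binary search for the smallest x in [lo, hi] with p x
def pyLeast (p : Int → Bool) (lo hi : Int) : Int :=
  if h : lo < hi then
    let mid := PySem.Int.floordiv (lo + hi) 2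
    if p mid then pyLeast p lo mid else pyLeast p (mid + 1) hi
  else lo
termination_by (hi - lo).toNat
decreasing_by
  · have h1 := (PySem.Int.floordiv_lt_iff_lt_mul (a := lo + hi) (b := 2) (q := hi) (by omega)).mpr (by omega)
    omega
  · have h2 := (PySem.Int.le_floordiv_iff_mul_le (a := lo + hi) (b := 2) (q := lo) (by omega)).mpr (by omega)
    omega

def position_by_index_alt (index : Int) (n : Int) : Int × Int :=
  if index ≤ 1 then (1, 1)
  else if n ≤ 0 then (index, 1)
  else if index ≤ 3 * n * n then
    let r := pyLeast (fun x => decide (index ≤ x * (2 * n + x))) 1 n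
    (r, index - (r - 1) * (2 * n + r - 1))
  else if index ≤ 7 * n * n then
    let c := index - 3 * n * n
    let k := pyLeast (fun x => decide (c ≤ x * (4 * n - x))) 1 (2 * n)
    (n + k, c - (k - 1) * (4 * n - k + 1))
  else (3 * n + index - 7 * n * n, 1)

-- ===== PRECONDITION & SPEC =====
def Spec_position_by_index (index : Int) (n : Int) (out : Int × Int) : Prop := out = position_by_index_alt index n
instance (index : Int) (n : Int) (out : Int × Int) : Decidable (Spec_position_by_index index n out) := by unfold Spec_position_by_index; infer_instance

-- ===== CLAIM (what is proved, stated in full; the proofs are below) =====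
def Claim_equal_position_by_index : Prop := ∀ (index : Int) (n : Int), Dom_position_by_index index n → Spec_position_by_index index n (position_by_index index n)

-- ===== LEMMAS AND PROOFS =====

-- closed-form full state (row, pos, width) of A's loop at cell number c (c ≥ 1)
def F (n c : Int) : Int × Int × Int :=
  if c ≤ 1 then (1, 1, 2 * n + 1)
  else if n ≤ 0 then (c, 1, 2 * n + 3 - 2 * c)
  else if c ≤ 3 * n * n then
    let r := pyLeast (fun x => decide (c ≤ x * (2 * n + x))) 1 n
    (r, c - (r - 1) * (2 * n + r - 1), 2 * n - 1 + 2 * r)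
  else if c ≤ 7 * n * n then
    let c' := c - 3 * n * n
    let k := pyLeast (fun x => decide (c' ≤ x * (4 * n - x))) 1 (2 * n)
    (n + k, c' - (k - 1) * (4 * n - k + 1), 4 * n + 1 - 2 * k)
  else (3 * n + c - 7 * n * n, 1, 1 - 2 * (c - 7 * n * n))

-- binary-search correctness
theorem pyLeast_spec (p : Int → Bool) (lo hi : Int) (hle : lo ≤ hi) (hhi : p hi = true)
    (mono : ∀ a b : Int, lo ≤ a → a ≤ b → b ≤ hi → p a = true → p b = true) :
    lo ≤ pyLeast p lo hi ∧ pyLeast p lo hi ≤ hi ∧ p (pyLeast p lo hi) = true ∧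
      ∀ x : Int, lo ≤ x → x < pyLeast p lo hi → p x = false := by
  fun_induction pyLeast p lo hi with
  | case1 lo hi h mid hp ih =>
      have hb := PySem.Int.floordiv_two_mid_bounds (lo := lo) (hi := hi) (by omega)
      obtain ⟨i1, i2, i3, i4⟩ := ih (by omega) hp
        (fun a b ha hab hb' => mono a b ha hab (by omega))
      exact ⟨i1, by omega, i3, i4⟩
  | case2 lo hi h mid hp ih =>
      have hb := PySem.Int.floordiv_two_mid_bounds (lo := lo) (hi := hi) (by omega)
      have hmlt : mid < hi :=
        (PySem.Int.floordiv_lt_iff_lt_mul (a := lo + hi) (b := 2) (q := hi) (by omega)).mpr (by omega)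
      obtain ⟨i1, i2, i3, i4⟩ := ih (by omega) hhi
        (fun a b ha hab hb' => mono a b (by omega) hab hb')
      refine ⟨by omega, i2, i3, ?_⟩
      intro x hx hxlt
      by_cases hxm : x ≤ mid
      · -- p x true would force p mid true by mono, contradiction
        cases hpx : p x with
        | false => rfl
        | true =>
            have := mono x mid hx hxm (by omega) hpx
            simp [this] at hp
      · exact i4 x (by omega) hxlt
  | case3 lo hi h =>
      have heq : lo = hi := by omega
      exact ⟨le_rfl, hle, heq ▸ hhi, fun x hx hlt => absurd hlt (by omega)⟩

-- unique characterisation: pyLeast = the r with ¬p (r-1) (or r = lo) and p r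
theorem pyLeast_eq (p : Int → Bool) (lo hi r : Int) (hle : lo ≤ hi) (hhi : p hi = true)
    (mono : ∀ a b : Int, lo ≤ a → a ≤ b → b ≤ hi → p a = true → p b = true)
    (hr1 : lo ≤ r) (hr2 : r ≤ hi) (hpr : p r = true)
    (hprev : ∀ x : Int, lo ≤ x → x < r → p x = false) :
    pyLeast p lo hi = r := by
  obtain ⟨h1, h2, h3, h4⟩ := pyLeast_spec p lo hi hle hhi mono
  by_contra hne
  rcases lt_or_gt_of_ne hne with h | h
  · have := hprev _ h1 h
    simp [this] at h3
  · have := h4 r hr1 h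
    simp [this] at hpr

-- A's loop body as a state transformer
def stepT (n : Int) (s : Int × Int × Int) : Int × Int × Int :=
  let pos' := s.2.1 + 1
  if pos' > s.2.2 then
    let row' := s.1 + 1
    (row', 1, if row' ≤ n then s.2.2 + 2 else if row' ≠ n + 1 then s.2.2 - 2 else s.2.2)
  else (s.1, pos', s.2.2)

theorem posLoop_succ (n : Int) (m : Nat) (row pos w : Int) :
    posLoop n (m + 1) row pos w =
      posLoop n m (stepT n (row, pos, w)).1 (stepT n (row, pos, w)).2.1 (stepT n (row, pos, w)).2.2 := by
  simp only [posLoop, stepT]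
  split_ifs <;> rfl

-- identify the binary search result in the growing half
theorem least1_eq (n c r : Int) (hn : 1 ≤ n) (hr1 : 1 ≤ r) (hrn : r ≤ n)
    (h1 : c ≤ r * (2 * n + r)) (h2 : (r - 1) * (2 * n + r - 1) < c) :
    pyLeast (fun x => decide (c ≤ x * (2 * n + x))) 1 n = r := by
  apply pyLeast_eq _ _ _ _ hn
  · have hmono : r * (2 * n + r) ≤ n * (2 * n + n) := by
      nlinarith [mul_nonneg (by omega : (0:Int) ≤ n - r) (by omega : (0:Int) ≤ 2 * n + r + n)]
    simp only [decide_eq_true_eq]; omega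
  · intro a b ha hab hbn hpa
    simp only [decide_eq_true_eq] at hpa ⊢
    nlinarith [mul_nonneg (by omega : (0:Int) ≤ b - a) (by omega : (0:Int) ≤ 2 * n + a + b)]
  · exact hr1
  · exact hrn
  · simp only [decide_eq_true_eq]; exact h1
  · intro x hx hxr
    simp only [decide_eq_false_iff_not, not_le]
    nlinarith [mul_nonneg (by omega : (0:Int) ≤ r - 1 - x) (by omega : (0:Int) ≤ 2 * n + x + r - 1)]

-- identify the binary search result in the shrinking half
theorem least2_eq (n c k : Int) (hn : 1 ≤ n) (hk1 : 1 ≤ k) (hkn : k ≤ 2 * n)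
    (h1 : c ≤ k * (4 * n - k)) (h2 : (k - 1) * (4 * n - k + 1) < c) :
    pyLeast (fun x => decide (c ≤ x * (4 * n - x))) 1 (2 * n) = k := by
  apply pyLeast_eq _ _ _ _ (by omega)
  · have hmono : k * (4 * n - k) ≤ 2 * n * (4 * n - 2 * n) := by
      nlinarith [mul_nonneg (by omega : (0:Int) ≤ 2 * n - k) (by omega : (0:Int) ≤ 4 * n - k - 2 * n)]
    simp only [decide_eq_true_eq]; omega
  · intro a b ha hab hbn hpa
    simp only [decide_eq_true_eq] at hpa ⊢
    nlinarith [mul_nonneg (by omega : (0:Int) ≤ b - a) (by omega : (0:Int) ≤ 4 * n - a - b)]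
  · exact hk1
  · exact hkn
  · simp only [decide_eq_true_eq]; exact h1
  · intro x hx hxk
    simp only [decide_eq_false_iff_not, not_le]
    nlinarith [mul_nonneg (by omega : (0:Int) ≤ k - 1 - x) (by omega : (0:Int) ≤ 4 * n - x - (k - 1))]

-- evaluation lemmas for F
theorem F_eval0 (n c : Int) (h : c ≤ 1) : F n c = (1, 1, 2 * n + 1) := by
  unfold F; rw [if_pos h]

theorem F_evalneg (n c : Int) (hn : n ≤ 0) (hc : 2 ≤ c) :
    F n c = (c, 1, 2 * n + 3 - 2 * c) := by
  unfold F; rw [if_neg (by omega), if_pos hn]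

theorem F_eval1 (n c r : Int) (hn : 1 ≤ n) (hc : 2 ≤ c) (h3 : c ≤ 3 * n * n)
    (hr1 : 1 ≤ r) (hrn : r ≤ n)
    (hcr : c ≤ r * (2 * n + r)) (hcr' : (r - 1) * (2 * n + r - 1) < c) :
    F n c = (r, c - (r - 1) * (2 * n + r - 1), 2 * n - 1 + 2 * r) := by
  unfold F
  rw [if_neg (by omega), if_neg (by omega), if_pos h3]
  simp only [least1_eq n c r hn hr1 hrn hcr hcr']

theorem F_eval2 (n c k : Int) (hn : 1 ≤ n) (h3 : 3 * n * n < c) (h7 : c ≤ 7 * n * n)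
    (hk1 : 1 ≤ k) (hkn : k ≤ 2 * n)
    (hck : c - 3 * n * n ≤ k * (4 * n - k)) (hck' : (k - 1) * (4 * n - k + 1) < c - 3 * n * n) :
    F n c = (n + k, c - 3 * n * n - (k - 1) * (4 * n - k + 1), 4 * n + 1 - 2 * k) := by
  unfold F
  rw [if_neg (by nlinarith), if_neg (by omega), if_neg (by omega), if_pos h7]
  simp only [least2_eq n (c - 3 * n * n) k hn hk1 hkn hck hck']

theorem F_eval3 (n c : Int) (hn : 1 ≤ n) (h7 : 7 * n * n < c) :
    F n c = (3 * n + c - 7 * n * n, 1, 1 - 2 * (c - 7 * n * n)) := by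
  unfold F
  rw [if_neg (by nlinarith), if_neg (by omega), if_neg (by nlinarith), if_neg (by omega)]

-- evaluation of the loop body
theorem stepT_eval (n row pos w : Int) :
    stepT n (row, pos, w) =
      if pos + 1 > w then
        (row + 1, 1, if row + 1 ≤ n then w + 2 else if row + 1 ≠ n + 1 then w - 2 else w)
      else (row, pos + 1, w) := rfl

-- A's loop step preserves F
theorem stepF (n c : Int) (hc : 1 ≤ c) :
    stepT n (F n c) = F n (c + 1) := by
  by_cases hn : n ≤ 0
  · -- degenerate grid: rows of width ≤ 1, every step advances the row
    by_cases h1 : c = 1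
    · subst h1
      rw [F_eval0 n 1 le_rfl, F_evalneg n (1 + 1) hn (by omega), stepT_eval]
      rw [if_pos (by omega), if_neg (by omega), if_pos (by omega)]
      refine congrArg₂ Prod.mk (rfl) (congrArg₂ Prod.mk (rfl) (by ring))
    · rw [F_evalneg n c hn (by omega), F_evalneg n (c + 1) hn (by omega), stepT_eval]
      rw [if_pos (by omega), if_neg (by omega), if_pos (by omega)]
      refine congrArg₂ Prod.mk (rfl) (congrArg₂ Prod.mk (rfl) (by ring))
  · replace hn : 1 ≤ n := by omega
    by_cases h1 : c = 1
    · -- first cell of the first row (width 2n+1 ≥ 3)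
      subst h1
      rw [F_eval0 n 1 le_rfl, stepT_eval, if_neg (by omega),
        F_eval1 n (1 + 1) 1 hn (by omega) (by nlinarith) (by omega) hn (by nlinarith) (by omega)]
      refine congrArg₂ Prod.mk (rfl) (congrArg₂ Prod.mk (by ring) (by ring))
    · by_cases h3 : c ≤ 3 * n * n - 1
      · -- both c and c+1 lie in the growing half
        obtain ⟨hr1, hrn, hpr, hprev⟩ := pyLeast_spec (fun x => decide (c ≤ x * (2 * n + x))) 1 n hn
          (by simp only [decide_eq_true_eq]; nlinarith)
          (fun a b ha hab hbn hpa => by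
            simp only [decide_eq_true_eq] at hpa ⊢
            nlinarith [mul_nonneg (by omega : (0:Int) ≤ b - a) (by omega : (0:Int) ≤ 2 * n + a + b)])
        set r := pyLeast (fun x => decide (c ≤ x * (2 * n + x))) 1 n with hrdef
        simp only [decide_eq_true_eq] at hpr
        have hprev' : (r - 1) * (2 * n + r - 1) < c := by
          by_cases hr2 : r = 1
          · rw [hr2]; simpa using hc
          · have := hprev (r - 1) (by omega) (by omega)
            simp only [decide_eq_false_iff_not, not_le] at this
            calc (r - 1) * (2 * n + r - 1) = (r - 1) * (2 * n + (r - 1)) := by ring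
              _ < c := this
        rw [F_eval1 n c r hn (by omega) (by omega) hr1 hrn hpr hprev', stepT_eval]
        by_cases hbd : c + 1 ≤ r * (2 * n + r)
        · -- stay in the same row
          rw [if_neg (by nlinarith),
            F_eval1 n (c + 1) r hn (by omega) (by omega) hr1 hrn hbd (by omega)]
          refine congrArg₂ Prod.mk (rfl) (congrArg₂ Prod.mk (by ring) (rfl))
        · -- row boundary: c = r*(2n+r), move to row r+1
          have hceq : c = r * (2 * n + r) := by omega
          have hrn' : r + 1 ≤ n := by
            by_contra hcon
            rw [(by omega : r = n)] at hceq
            nlinarith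
          rw [if_pos (by nlinarith), if_pos (by omega),
            F_eval1 n (c + 1) (r + 1) hn (by omega) (by omega) (by omega) hrn'
              (by nlinarith) (by nlinarith)]
          refine congrArg₂ Prod.mk (rfl) (congrArg₂ Prod.mk (by nlinarith) (by ring))
      · by_cases h3' : c ≤ 3 * n * n
        · -- c = 3n²: last cell of row n, move to the middle row n+1
          have hceq : c = 3 * n * n := by omega
          rw [F_eval1 n c n hn (by omega) h3' hn le_rfl (by nlinarith) (by nlinarith),
            stepT_eval, if_pos (by nlinarith), if_neg (by omega), if_neg (by omega),
            F_eval2 n (c + 1) 1 hn (by omega) (by nlinarith) le_rfl (by omega)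
              (by nlinarith) (by nlinarith)]
          refine congrArg₂ Prod.mk (rfl) (congrArg₂ Prod.mk (by nlinarith) (by ring))
        · replace h3' : 3 * n * n < c := by omega
          by_cases h7 : c ≤ 7 * n * n - 1
          · -- both c and c+1 lie in the shrinking half
            obtain ⟨hk1, hkn, hpk, hkprev⟩ := pyLeast_spec (fun x => decide (c - 3 * n * n ≤ x * (4 * n - x))) 1 (2 * n) (by omega)
              (by simp only [decide_eq_true_eq]; nlinarith)
              (fun a b ha hab hbn hpa => by
                simp only [decide_eq_true_eq] at hpa ⊢
                nlinarith [mul_nonneg (by omega : (0:Int) ≤ b - a) (by omega : (0:Int) ≤ 4 * n - a - b)])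
            set k := pyLeast (fun x => decide (c - 3 * n * n ≤ x * (4 * n - x))) 1 (2 * n) with hkdef
            simp only [decide_eq_true_eq] at hpk
            have hkprev' : (k - 1) * (4 * n - k + 1) < c - 3 * n * n := by
              by_cases hk2 : k = 1
              · rw [hk2]; simp only [sub_self, zero_mul]; omega
              · have := hkprev (k - 1) (by omega) (by omega)
                simp only [decide_eq_false_iff_not, not_le] at this
                calc (k - 1) * (4 * n - k + 1) = (k - 1) * (4 * n - (k - 1)) := by ring
                  _ < c - 3 * n * n := this
            rw [F_eval2 n c k hn (by omega) (by omega) hk1 hkn hpk hkprev', stepT_eval]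
            by_cases hbd : c - 3 * n * n + 1 ≤ k * (4 * n - k)
            · rw [if_neg (by nlinarith),
                F_eval2 n (c + 1) k hn (by omega) (by omega) hk1 hkn (by omega) (by omega)]
              refine congrArg₂ Prod.mk (rfl) (congrArg₂ Prod.mk (by ring) (rfl))
            · have hceq : c - 3 * n * n = k * (4 * n - k) := by omega
              have hkn' : k + 1 ≤ 2 * n := by
                by_contra hcon
                rw [(by omega : k = 2 * n)] at hceq
                nlinarith
              rw [if_pos (by nlinarith), if_neg (by omega), if_pos (by omega),
                F_eval2 n (c + 1) (k + 1) hn (by omega) (by omega) (by omega) hkn'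
                  (by nlinarith) (by nlinarith)]
              refine congrArg₂ Prod.mk (by ring) (congrArg₂ Prod.mk (by nlinarith) (by ring))
          · by_cases h7' : c ≤ 7 * n * n
            · -- c = 7n²: last cell of the last real row
              have hceq : c = 7 * n * n := by omega
              rw [F_eval2 n c (2 * n) hn (by omega) h7' (by omega) le_rfl
                  (by nlinarith) (by nlinarith),
                stepT_eval, if_pos (by nlinarith), if_neg (by omega), if_pos (by omega),
                F_eval3 n (c + 1) hn (by omega)]
              subst hceq
              refine congrArg₂ Prod.mk (by ring) (congrArg₂ Prod.mk (by ring) (by ring))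
            · -- past the grid: width negative, row advances each step
              replace h7' : 7 * n * n < c := by omega
              rw [F_eval3 n c hn h7', F_eval3 n (c + 1) hn (by omega), stepT_eval]
              rw [if_pos (by nlinarith), if_neg (by omega), if_pos (by omega)]
              refine congrArg₂ Prod.mk (by ring) (congrArg₂ Prod.mk (rfl) (by ring))

-- iterate A's loop from F n c
theorem loop_F (m : Nat) (n c : Int) (hc : 1 ≤ c) :
    posLoop n m (F n c).1 (F n c).2.1 (F n c).2.2 =
      ((F n (c + m)).1, (F n (c + m)).2.1) := by
  induction m generalizing c with
  | zero => simp [posLoop]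
  | succ k ih =>
      rw [posLoop_succ]
      have h := stepF n c hc
      rw [show ((F n c).1, (F n c).2.1, (F n c).2.2) = F n c from rfl, h]
      have harg : c + ((k + 1 : Nat) : Int) = (c + 1) + (k : Int) := by push_cast; ring
      rw [harg]
      exact ih (c + 1) (by omega)

-- B computes the first two components of F
theorem B_eq_F (index n : Int) :
    position_by_index_alt index n = ((F n (max index 1)).1, (F n (max index 1)).2.1) := by
  unfold position_by_index_alt F
  by_cases h : index ≤ 1
  · rw [max_eq_right h]
    simp [h]
  · rw [max_eq_left (by omega : (1:Int) ≤ index)]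
    simp only [if_neg (by omega : ¬ index ≤ 1)]
    split_ifs <;> rfl

-- ===== VERDICT (by name: the statement is the Claim_ definition above) =====
theorem position_by_index_spec : Claim_equal_position_by_index := by
  intro index n _
  unfold Spec_position_by_index
  rw [B_eq_F]
  have h1 : F n 1 = (1, 1, 2 * n + 1) := by simp [F]
  have := loop_F (index - 1).toNat n 1 le_rfl
  rw [h1] at this
  unfold position_by_index
  rw [show n * 2 + 1 = 2 * n + 1 by ring, this,
    show (1 : Int) + ((index - 1).toNat : Int) = max index 1 by omega]
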